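-- pv_equiv track=rewrite | github.com/wzygxr/shuati | class170_SqrtDecomposition/Code40_LeetCode2439_Python.py | minimizeArrayValueOptimized
-- ===== SOURCE A (Python) =====
-- from typing import List
--
-- def minimizeArrayValueOptimized(nums: List[int]) -> int:
--     """
--     优化版本的前缀和贪心算法
--     通过减少函数调用和使用更高效的数据处理方式
--
--     Args:
--         nums: 输入数组
--
--     Returns:
--         int: 最小的可能的数组最大值
--     """
--     prefix_sum = 0
--     result = 0
--     n = len(nums)
--
--     # 直接循环而不是使用range，减少一些开销
--     i = 0
--     while i < n:
--         prefix_sum += nums[i]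
--         # 计算当前最大值
--         current_max = (prefix_sum + i) // (i + 1)
--         if current_max > result:
--             result = current_max
--         i += 1
--
--     return result
-- ===== SOURCE B (Python) =====
-- from typing import List
--
-- def _feasible(nums: List[int], m: int) -> bool:
--     total = 0
--     for k, x in enumerate(nums):
--         total += x
--         if total > m * (k + 1):
--             return False
--     return True
--
-- def minimizeArrayValueOptimized(nums: List[int]) -> int:
--     if not nums:
--         return 0
--     hi = max(nums)
--     if hi < 0:
--         hi = 0
--     lo = 0
--     while lo < hi:
--         mid = (lo + hi) // 2
--         if _feasible(nums, mid):
--             hi = mid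
--         else:
--             lo = mid + 1
--     return lo
-- ===== Notes on version B (the rewrite author's own statement) =====
-- stated objective: alternative
-- what changed: Replaces the single-pass running maximum of ceiling prefix averages with a binary search on the answer value over [0, max(nums)] using a linear feasibility scan (prefix_i <= m*(i+1)).
import Mathlib
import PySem

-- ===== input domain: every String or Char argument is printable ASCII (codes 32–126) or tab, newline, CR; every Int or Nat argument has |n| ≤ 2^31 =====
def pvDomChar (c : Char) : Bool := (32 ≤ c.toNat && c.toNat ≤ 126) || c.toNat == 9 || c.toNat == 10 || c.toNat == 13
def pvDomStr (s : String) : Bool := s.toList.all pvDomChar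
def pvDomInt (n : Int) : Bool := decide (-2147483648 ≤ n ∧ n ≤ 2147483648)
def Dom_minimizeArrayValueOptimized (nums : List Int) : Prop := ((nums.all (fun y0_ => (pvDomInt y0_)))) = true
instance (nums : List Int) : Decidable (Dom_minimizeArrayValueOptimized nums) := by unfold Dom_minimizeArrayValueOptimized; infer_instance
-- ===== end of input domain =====

-- B changes the algorithm: binary search on the answer with a linear feasibility scan,
-- instead of A's one-pass maximum of ceiling prefix averages (objective: alternative).

-- ===== PORT A =====
-- the while loop of A: state (prefix_sum, result, i), one step per element
def aLoop (xs : List Int) (prefixSum result i : Int) : Int :=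
  match xs with
  | [] => result
  | x :: rest =>
    let p := prefixSum + x
    let currentMax := PySem.Int.floordiv (p + i) (i + 1)
    aLoop rest p (if currentMax > result then currentMax else result) (i + 1)

def minimizeArrayValueOptimized (nums : List Int) : Int :=
  aLoop nums 0 0 0

-- ===== PORT B =====
-- feasibility scan: does value m dominate every prefix average?
def feasAux (xs : List Int) (total k m : Int) : Bool :=
  match xs with
  | [] => true
  | x :: rest =>
    let t := total + x
    if t > m * (k + 1) then false else feasAux rest t (k + 1) m

def bsearch (nums : List Int) (lo hi : Int) : Int :=
  if h : lo < hi then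
    let mid := PySem.Int.floordiv (lo + hi) 2
    if feasAux nums 0 0 mid then bsearch nums lo mid else bsearch nums (mid + 1) hi
  else lo
termination_by (hi - lo).toNat
decreasing_by
  · have := PySem.Int.floordiv_two_mid_bounds (le_of_lt h)
    have h2 : PySem.Int.floordiv (lo + hi) 2 < hi := by
      rw [PySem.Int.floordiv_lt_iff_lt_mul (by omega)]; omega
    omega
  · have := PySem.Int.floordiv_two_mid_bounds (le_of_lt h)
    omega

def minimizeArrayValueOptimized_alt (nums : List Int) : Int :=
  match nums with
  | [] => 0
  | _ :: _ =>
    let hi := (PySem.List.max? nums (fun y => y)).getD 0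
    let hi := if hi < 0 then 0 else hi
    bsearch nums 0 hi

-- ===== PRECONDITION & SPEC =====
def Spec_minimizeArrayValueOptimized (nums : List Int) (out : Int) : Prop := out = minimizeArrayValueOptimized_alt nums
instance (nums : List Int) (out : Int) : Decidable (Spec_minimizeArrayValueOptimized nums out) := by unfold Spec_minimizeArrayValueOptimized; infer_instance

-- ===== CLAIM (what is proved, stated in full; the proofs are below) =====
def Claim_equal_minimizeArrayValueOptimized : Prop := ∀ (nums : List Int), Dom_minimizeArrayValueOptimized nums → Spec_minimizeArrayValueOptimized nums (minimizeArrayValueOptimized nums)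

-- ===== LEMMAS AND PROOFS =====

-- ceiling bracket: (p + i) // (i+1) ≤ m ↔ p ≤ m * (i+1)   (0 ≤ i)
theorem ceil_le_iff (p i m : Int) (hi : 0 ≤ i) :
    PySem.Int.floordiv (p + i) (i + 1) ≤ m ↔ p ≤ m * (i + 1) := by
  constructor
  · intro h
    have h2 : ¬ (m + 1 ≤ PySem.Int.floordiv (p + i) (i + 1)) := by omega
    rw [PySem.Int.le_floordiv_iff_mul_le (by omega)] at h2
    nlinarith
  · intro h
    have h2 : PySem.Int.floordiv (p + i) (i + 1) < m + 1 := by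
      rw [PySem.Int.floordiv_lt_iff_lt_mul (by omega)]; nlinarith
    omega

-- characterization of A's loop result as a least upper bound
theorem aLoop_le_iff (xs : List Int) (p r i m : Int) (hi : 0 ≤ i) :
    aLoop xs p r i ≤ m ↔
      r ≤ m ∧ ∀ j < xs.length, p + ((xs.take (j + 1)).sum) ≤ m * (i + j + 1) := by
  induction xs generalizing p r i with
  | nil => simp [aLoop]
  | cons x rest ih =>
    simp only [aLoop]
    rw [ih _ _ _ (by omega)]
    have hc := ceil_le_iff (p + x) i m hi
    set cM := PySem.Int.floordiv (p + x + i) (i + 1) with hcM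
    constructor
    · rintro ⟨h1, h2⟩
      have hmax : r ≤ m ∧ cM ≤ m := by
        by_cases hcr : cM > r
        · rw [if_pos hcr] at h1; omega
        · rw [if_neg hcr] at h1; omega
      refine ⟨hmax.1, fun j hj => ?_⟩
      match j with
      | 0 =>
        have h4 := hc.mp hmax.2
        simp only [List.take_succ_cons, List.take_zero, List.sum_cons, List.sum_nil,
          Nat.cast_zero, add_zero]
        linarith
      | Nat.succ j =>
        have h3 := h2 j (by simp at hj ⊢; omega)
        simp only [List.take_succ_cons, List.sum_cons]
        calc p + (x + ((rest.take (j + 1)).sum)) = (p + x) + ((rest.take (j + 1)).sum) := by ring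
          _ ≤ m * (i + 1 + (j : Int) + 1) := h3
          _ = m * (i + ((j + 1 : Nat) : Int) + 1) := by push_cast; ring
    · rintro ⟨h1, h2⟩
      have h0 : p + x ≤ m * (i + 1) := by
        have h4 := h2 0 (by simp)
        simp only [List.take_succ_cons, List.take_zero, List.sum_cons, List.sum_nil,
          Nat.cast_zero, add_zero] at h4
        linarith
      have hcm : cM ≤ m := hc.mpr h0
      refine ⟨by split <;> omega, fun j hj => ?_⟩
      have h3 := h2 (j + 1) (by simp at hj ⊢; omega)
      simp only [List.take_succ_cons, List.sum_cons] at h3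
      calc (p + x) + ((rest.take (j + 1)).sum) = p + (x + ((rest.take (j + 1)).sum)) := by ring
        _ ≤ m * (i + ((j + 1 : Nat) : Int) + 1) := h3
        _ = m * (i + 1 + (j : Int) + 1) := by push_cast; ring

-- characterization of the feasibility scan
theorem feasAux_iff (xs : List Int) (t k m : Int) :
    feasAux xs t k m = true ↔
      ∀ j < xs.length, t + ((xs.take (j + 1)).sum) ≤ m * (k + j + 1) := by
  induction xs generalizing t k with
  | nil => simp [feasAux]
  | cons x rest ih =>
    simp only [feasAux]
    by_cases hx : t + x > m * (k + 1)
    · simp only [if_pos hx, Bool.false_eq_true, false_iff]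
      intro h
      have := h 0 (by simp)
      simp only [List.take_succ_cons, List.take_zero, List.sum_cons, List.sum_nil,
        Nat.cast_zero, add_zero] at this
      linarith
    · simp only [if_neg hx]
      rw [ih]
      constructor
      · intro h j hj
        match j with
        | 0 =>
          simp only [List.take_succ_cons, List.take_zero, List.sum_cons, List.sum_nil,
            Nat.cast_zero, add_zero]
          linarith
        | Nat.succ j =>
          have h3 := h j (by simp at hj ⊢; omega)
          simp only [List.take_succ_cons, List.sum_cons]
          calc t + (x + ((rest.take (j + 1)).sum)) = (t + x) + ((rest.take (j + 1)).sum) := by ring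
            _ ≤ m * (k + 1 + (j : Int) + 1) := h3
            _ = m * (k + ((j + 1 : Nat) : Int) + 1) := by push_cast; ring
      · intro h j hj
        have h3 := h (j + 1) (by simp at hj ⊢; omega)
        simp only [List.take_succ_cons, List.sum_cons] at h3
        calc (t + x) + ((rest.take (j + 1)).sum) = t + (x + ((rest.take (j + 1)).sum)) := by ring
          _ ≤ m * (k + ((j + 1 : Nat) : Int) + 1) := h3
          _ = m * (k + 1 + (j : Int) + 1) := by push_cast; ring

-- sum of a list bounded elementwise
theorem sum_le_card_mul (xs : List Int) (c : Int) (h : ∀ x ∈ xs, x ≤ c) :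
    xs.sum ≤ c * xs.length := by
  induction xs with
  | nil => simp
  | cons x rest ih =>
    simp only [List.sum_cons, List.length_cons]
    have := ih (fun y hy => h y (List.mem_cons_of_mem _ hy))
    have hx := h x (List.mem_cons_self ..)
    push_cast
    nlinarith

-- binary search finds the unique r in [lo, hi] that is feasible and minimal
theorem bsearch_eq (nums : List Int) (lo hi r : Int)
    (hlo : lo ≤ r) (hhi : r ≤ hi)
    (hf : feasAux nums 0 0 r = true)
    (hmin : ∀ m, lo ≤ m → feasAux nums 0 0 m = true → r ≤ m) :
    bsearch nums lo hi = r := by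
  by_cases h : lo < hi
  · rw [bsearch, dif_pos h]
    have hmid := PySem.Int.floordiv_two_mid_bounds (le_of_lt h)
    have hmidlt : PySem.Int.floordiv (lo + hi) 2 < hi := by
      rw [PySem.Int.floordiv_lt_iff_lt_mul (by omega)]; omega
    set mid := PySem.Int.floordiv (lo + hi) 2 with hm
    by_cases hfm : feasAux nums 0 0 mid = true
    · rw [if_pos hfm]
      exact bsearch_eq nums lo mid r hlo (hmin mid hmid.1 hfm) hf hmin
    · rw [if_neg hfm]
      have hrm : mid + 1 ≤ r := by
        by_contra hc
        have hrle : r ≤ mid := by omega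
        -- monotonicity of feasibility via its characterization
        apply hfm
        rw [feasAux_iff] at hf ⊢
        intro j hj
        have := hf j hj
        have hj1 : (0 : Int) ≤ (j : Int) + 1 := by omega
        nlinarith [hf j hj]
      exact bsearch_eq nums (mid + 1) hi r hrm hhi hf
        (fun m hm hfme => hmin m (by omega) hfme)
  · have : lo = hi := by omega
    rw [bsearch, dif_neg h]; omega
termination_by (hi - lo).toNat
decreasing_by
  · have := PySem.Int.floordiv_two_mid_bounds (le_of_lt h)
    omega
  · omega

-- ===== VERDICT (by name: the statement is the Claim_ definition above) =====
theorem minimizeArrayValueOptimized_spec : Claim_equal_minimizeArrayValueOptimized := by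
  intro nums _
  unfold Spec_minimizeArrayValueOptimized
  match hn : nums with
  | [] => simp [minimizeArrayValueOptimized, minimizeArrayValueOptimized_alt, aLoop]
  | y :: ys =>
    simp only [minimizeArrayValueOptimized, minimizeArrayValueOptimized_alt]
    set r := aLoop (y :: ys) 0 0 0 with hr
    -- facts about r from the characterization
    have hself := (aLoop_le_iff (y :: ys) 0 0 0 r (le_refl 0)).mp (le_refl r)
    have hrpos : 0 ≤ r := hself.1
    have hfr : feasAux (y :: ys) 0 0 r = true := by
      rw [feasAux_iff]
      intro j hj
      simpa using hself.2 j hj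
    have hmin : ∀ m, 0 ≤ m → feasAux (y :: ys) 0 0 m = true → r ≤ m := by
      intro m hm hfm
      rw [feasAux_iff] at hfm
      rw [aLoop_le_iff _ _ _ _ _ (le_refl 0)]
      exact ⟨hm, fun j hj => by simpa using hfm j hj⟩
    -- the upper bound hi0 is feasible, hence r ≤ hi0
    have hmx : PySem.List.max? (y :: ys) (fun z => z) = some (List.foldl max y ys) :=
      PySem.List.max?_id_cons y ys
    set mx := List.foldl max y ys with hmxdef
    have hmax : ∀ z ∈ (y :: ys), z ≤ mx := PySem.List.max?_isMax hmx
    rw [hmx]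
    set hi0 := if (mx : Int) < 0 then (0 : Int) else mx with hhi0
    have hhi0nn : 0 ≤ hi0 := by rw [hhi0]; split <;> omega
    have hmaxhi : ∀ z ∈ (y :: ys), z ≤ hi0 := by
      intro z hz
      have := hmax z hz
      rw [hhi0]; split <;> omega
    have hfhi : feasAux (y :: ys) 0 0 hi0 = true := by
      rw [feasAux_iff]
      intro j hj
      have hsub : ∀ z ∈ (y :: ys).take (j + 1), z ≤ hi0 :=
        fun z hz => hmaxhi z (List.take_subset _ _ hz)
      have hs := sum_le_card_mul _ hi0 hsub
      have hlen : ((y :: ys).take (j + 1)).length = j + 1 := by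
        rw [List.length_take]; omega
      rw [hlen] at hs
      push_cast at hs
      have heq : hi0 * ((j : Int) + 1) = hi0 * (0 + (j : Int) + 1) := by ring
      linarith
    have hrhi : r ≤ hi0 := hmin hi0 hhi0nn hfhi
    exact (bsearch_eq (y :: ys) 0 hi0 r hrpos hrhi hfr hmin).symm
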